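-- pv_equiv track=rewrite | github.com/epofhisGSF/Charon-v1.3.27 | drifter_tracker.py | count_risky_holes
-- ===== SOURCE A (Python) =====
-- def count_risky_holes(route, connections):
--     """Count critical/destabilizing holes in route (for safest path calculation)"""
--     count = 0
--     for i in range(len(route) - 1):
--         system = route[i]
--         next_system = route[i + 1]
--         if system in connections:
--             for neighbor, wh_data in connections[system]:
--                 if neighbor == next_system:
--                     if wh_data['lifeStatus'] in ['Critical', 'Destabilizing']:
--                         count += 1
--     return count
-- ===== SOURCE B (Python) =====
-- def count_risky_holes(route, connections):
--     """Count critical/destabilizing holes in route (for safest path calculation)"""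
--     transitions = {}
--     for a, b in zip(route, route[1:]):
--         transitions[(a, b)] = transitions.get((a, b), 0) + 1
--     total = 0
--     for system, adj in connections.items():
--         for neighbor, wh_data in adj:
--             n = transitions.get((system, neighbor), 0)
--             if n and wh_data['lifeStatus'] in ['Critical', 'Destabilizing']:
--                 total += n
--     return total
-- ===== Notes on version B (the rewrite author's own statement) =====
-- stated objective: alternative
-- what changed: B builds a dict counting the route's consecutive directed transitions once, then makes a single pass over the graph's adjacency lists adding the transition count for each risky matching edge, instead of rescanning the looked-up adjacency list for every route step.
import Mathlib
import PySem

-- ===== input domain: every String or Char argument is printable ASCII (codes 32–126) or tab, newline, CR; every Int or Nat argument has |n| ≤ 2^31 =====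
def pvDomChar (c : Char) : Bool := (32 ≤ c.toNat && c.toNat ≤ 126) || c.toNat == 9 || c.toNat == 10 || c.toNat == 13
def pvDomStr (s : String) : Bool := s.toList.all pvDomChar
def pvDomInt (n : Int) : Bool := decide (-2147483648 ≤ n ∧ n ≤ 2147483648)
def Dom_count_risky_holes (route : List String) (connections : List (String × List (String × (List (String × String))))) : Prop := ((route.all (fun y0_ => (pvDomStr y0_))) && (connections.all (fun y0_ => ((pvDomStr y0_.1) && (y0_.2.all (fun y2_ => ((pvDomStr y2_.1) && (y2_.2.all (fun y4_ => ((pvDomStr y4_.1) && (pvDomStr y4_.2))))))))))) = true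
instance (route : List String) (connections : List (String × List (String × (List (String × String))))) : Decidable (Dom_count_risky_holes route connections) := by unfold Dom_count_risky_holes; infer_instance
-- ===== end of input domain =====

-- B replaces A's per-route-step adjacency rescan by one transition-count dict built from the
-- route and a single pass over the adjacency lists (objective: alternative traversal order).

-- ===== PORT A =====
-- wh_data['lifeStatus'] in ['Critical', 'Destabilizing']; Pre_ guarantees the key is present
-- wherever A evaluates this (Python raises KeyError otherwise), so the "" default is never read.
def pvRisky (wd : List (String × String)) : Bool :=
  ["Critical", "Destabilizing"].contains ((PySem.Dict.mk wd).getD "lifeStatus" "")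

def count_risky_holes (route : List String) (connections : List (String × List (String × (List (String × String))))) : Int :=
  (PySem.List.pyRange 0 ((route.length : Int) - 1)).foldl
    (fun count i =>
      let system := PySem.List.pyGetD route i ""
      let next_system := PySem.List.pyGetD route (i + 1) ""
      match (PySem.Dict.mk connections).get? system with
      | none => count
      | some adj =>
          adj.foldl (fun c q =>
            if q.1 == next_system then
              if pvRisky q.2 then c + 1 else c
            else c) count) 0

-- ===== PORT B =====
def count_risky_holes_alt (route : List String) (connections : List (String × List (String × (List (String × String))))) : Int :=
  let transitions : PySem.Dict (String × String) Int :=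
    (route.zip (PySem.List.slice route (some 1) none)).foldl
      (fun d p => d.insert p (d.getD p 0 + 1)) PySem.Dict.empty
  connections.foldl
    (fun total e =>
      e.2.foldl (fun t q =>
        let n := transitions.getD (e.1, q.1) 0
        if n != 0 && pvRisky q.2 then t + n else t) total) 0

-- ===== PRECONDITION & SPEC =====
-- Pre_ excludes (1) inputs where Python A raises KeyError: some on-route matching adjacency
-- entry whose wh_data dict lacks the key 'lifeStatus'; and (2) association lists whose keys
-- are not distinct — these do not encode any Python dict, so A can never receive them.
def Pre_count_risky_holes (route : List String) (connections : List (String × List (String × (List (String × String))))) : Prop :=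
  (connections.map Prod.fst).Nodup ∧
  ∀ p ∈ route.zip route.tail, ∀ q ∈ (PySem.Dict.mk connections).getD p.1 [],
    q.1 = p.2 → "lifeStatus" ∈ q.2.map Prod.fst
instance (route : List String) (connections : List (String × List (String × (List (String × String))))) : Decidable (Pre_count_risky_holes route connections) := by unfold Pre_count_risky_holes; infer_instance

def pvWitness_count_risky_holes : List String × (List (String × List (String × (List (String × String))))) :=
  (["Jita", "Amarr"], [("Jita", [("Amarr", [("lifeStatus", "Critical")])])])

def Spec_count_risky_holes (route : List String) (connections : List (String × List (String × (List (String × String))))) (out : Int) : Prop := out = count_risky_holes_alt route connections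
instance (route : List String) (connections : List (String × List (String × (List (String × String))))) (out : Int) : Decidable (Spec_count_risky_holes route connections out) := by unfold Spec_count_risky_holes; infer_instance

-- ===== CLAIM (what is proved, stated in full; the proofs are below) =====
def Claim_equal_count_risky_holes : Prop := ∀ (route : List String) (connections : List (String × List (String × (List (String × String))))), Dom_count_risky_holes route connections → Pre_count_risky_holes route connections → Spec_count_risky_holes route connections (count_risky_holes route connections)

-- ===== LEMMAS AND PROOFS =====

-- A's contribution of one route step (s, t): scan the looked-up adjacency list.
def pvG (connections : List (String × List (String × (List (String × String))))) (p : String × String) : Int :=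
  match (PySem.Dict.mk connections).get? p.1 with
  | none => 0
  | some adj => (adj.map (fun q => if q.1 == p.2 && pvRisky q.2 then (1 : Int) else 0)).sum

-- A's inner scan adds one per matching risky entry.
theorem pvA_inner (t : String) (adj : List (String × (List (String × String)))) (c : Int) :
    adj.foldl (fun c q =>
      if q.1 == t then (if pvRisky q.2 then c + 1 else c) else c) c
    = c + (adj.map (fun q => if q.1 == t && pvRisky q.2 then (1 : Int) else 0)).sum := by
  induction adj generalizing c with
  | nil => simp
  | cons q qs ih =>
    rw [List.foldl_cons, ih, List.map_cons, List.sum_cons]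
    by_cases h1 : q.1 == t <;> by_cases h2 : pvRisky q.2 <;> simp [h1, h2] <;> ring

-- A's outer loop over any index list, as a sum.
theorem pvA_outer (route : List String) (connections : List (String × List (String × (List (String × String)))))
    (L : List Int) (c : Int) :
    L.foldl (fun count i =>
      match (PySem.Dict.mk connections).get? (PySem.List.pyGetD route i "") with
      | none => count
      | some adj =>
          adj.foldl (fun c q =>
            if q.1 == PySem.List.pyGetD route (i + 1) "" then
              if pvRisky q.2 then c + 1 else c
            else c) count) c
    = c + (L.map (fun i => pvG connections (PySem.List.pyGetD route i "", PySem.List.pyGetD route (i + 1) ""))).sum := by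
  induction L generalizing c with
  | nil => simp
  | cons i L ih =>
    rw [List.foldl_cons, ih, List.map_cons, List.sum_cons]
    simp only [pvG]
    cases hmk : (PySem.Dict.mk connections).get? (PySem.List.pyGetD route i "") with
    | none =>
      show c + (L.map (fun i => pvG connections (PySem.List.pyGetD route i "", PySem.List.pyGetD route (i + 1) ""))).sum
        = c + (0 + (L.map (fun i => pvG connections (PySem.List.pyGetD route i "", PySem.List.pyGetD route (i + 1) ""))).sum)
      ring
    | some adj =>
      show adj.foldl (fun c q =>
            if q.1 == PySem.List.pyGetD route (i + 1) "" then
              if pvRisky q.2 then c + 1 else c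
            else c) c
          + (L.map (fun i => pvG connections (PySem.List.pyGetD route i "", PySem.List.pyGetD route (i + 1) ""))).sum
        = c + ((adj.map (fun q => if q.1 == PySem.List.pyGetD route (i + 1) "" && pvRisky q.2 then (1 : Int) else 0)).sum
          + (L.map (fun i => pvG connections (PySem.List.pyGetD route i "", PySem.List.pyGetD route (i + 1) ""))).sum)
      rw [pvA_inner]
      ring

-- index-based sum over range = sum over consecutive pairs
theorem pvRange_pairs (h : String × String → Int) (route : List String) :
    ((List.range (route.length - 1)).map
      (fun k => h (route.getD k "", route.getD (k + 1) ""))).sum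
    = ((route.zip route.tail).map h).sum := by
  induction route with
  | nil => simp
  | cons x xs ih =>
    cases xs with
    | nil => simp
    | cons y tl =>
      rw [show (x :: y :: tl).length - 1 = tl.length + 1 by simp, List.range_succ_eq_map]
      rw [List.map_cons, List.sum_cons, List.map_map]
      have hmap : (List.range tl.length).map
          ((fun k => h ((x :: y :: tl).getD k "", (x :: y :: tl).getD (k + 1) "")) ∘ Nat.succ)
          = (List.range ((y :: tl).length - 1)).map
            (fun k => h ((y :: tl).getD k "", (y :: tl).getD (k + 1) "")) := by
        rw [show (y :: tl).length - 1 = tl.length by simp]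
        apply List.map_congr_left
        intro k _
        simp [Function.comp]
      rw [hmap, ih]
      simp [List.zip]

-- A equals the pair-sum of pvG.
theorem pvA_eq_sum (route : List String) (connections : List (String × List (String × (List (String × String))))) :
    count_risky_holes route connections = ((route.zip route.tail).map (pvG connections)).sum := by
  have h : count_risky_holes route connections
      = 0 + ((PySem.List.pyRange 0 ((route.length : Int) - 1)).map
          (fun i => pvG connections (PySem.List.pyGetD route i "", PySem.List.pyGetD route (i + 1) ""))).sum :=
    pvA_outer route connections _ 0
  rw [h, Int.zero_add]
  cases route with
  | nil =>
    have h0 : PySem.List.pyRange 0 ((([] : List String).length : Int) - 1) = [] := by decide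
    rw [h0]
    simp
  | cons x xs =>
    have hcast : (((x :: xs).length : Int)) - 1 = ((xs.length : Nat) : Int) := by simp
    rw [hcast, PySem.List.pyRange_zero_natCast, List.map_map]
    have hmap : ((List.range xs.length).map
        ((fun i => pvG connections (PySem.List.pyGetD (x :: xs) i "", PySem.List.pyGetD (x :: xs) (i + 1) "")) ∘ (fun k : Nat => (k : Int)))).sum
        = ((List.range ((x :: xs).length - 1)).map
          (fun k => pvG connections ((x :: xs).getD k "", (x :: xs).getD (k + 1) ""))).sum := by
      rw [show (x :: xs).length - 1 = xs.length by simp]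
      apply congrArg
      apply List.map_congr_left
      intro k _
      simp only [Function.comp_apply]
      rw [show ((k : Int) + 1) = ((k + 1 : Nat) : Int) by push_cast; ring]
      rw [PySem.List.pyGetD_natCast, PySem.List.pyGetD_natCast]
    rw [hmap, pvRange_pairs]

-- B's inner loop over one adjacency list, for any dict that counts the route pairs.
theorem pvB_inner (pairs : List (String × String)) (d : PySem.Dict (String × String) Int)
    (hd : ∀ p, d.getD p 0 = (pairs.count p : Int)) (s : String)
    (adj : List (String × (List (String × String)))) (t : Int) :
    adj.foldl (fun t q =>
      if d.getD (s, q.1) 0 != 0 && pvRisky q.2 then t + d.getD (s, q.1) 0 else t) t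
    = t + (adj.map (fun q => if pvRisky q.2 then (pairs.count (s, q.1) : Int) else 0)).sum := by
  induction adj generalizing t with
  | nil => simp
  | cons q qs ih =>
    rw [List.foldl_cons, ih, List.map_cons, List.sum_cons, hd]
    by_cases h2 : pvRisky q.2 <;> by_cases h0 : pairs.count (s, q.1) = 0 <;>
      simp [h2, h0] <;> ring

-- B's outer loop over the adjacency structure, as a nested sum.
theorem pvB_outer (pairs : List (String × String)) (d : PySem.Dict (String × String) Int)
    (hd : ∀ p, d.getD p 0 = (pairs.count p : Int))
    (conns : List (String × List (String × (List (String × String))))) (t0 : Int) :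
    conns.foldl (fun total e =>
      e.2.foldl (fun t q =>
        if d.getD (e.1, q.1) 0 != 0 && pvRisky q.2 then t + d.getD (e.1, q.1) 0 else t) total) t0
    = t0 + (conns.map (fun e =>
        (e.2.map (fun q => if pvRisky q.2 then (pairs.count (e.1, q.1) : Int) else 0)).sum)).sum := by
  induction conns generalizing t0 with
  | nil => simp
  | cons e rest ih =>
    rw [List.foldl_cons, pvB_inner pairs d hd e.1 e.2 t0, ih, List.map_cons, List.sum_cons]
    ring

-- B equals the nested adjacency sum.
theorem pvB_eq_sum (route : List String) (connections : List (String × List (String × (List (String × String))))) :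
    count_risky_holes_alt route connections
    = (connections.map (fun e =>
        (e.2.map (fun q =>
          if pvRisky q.2 then ((route.zip route.tail).count (e.1, q.1) : Int) else 0)).sum)).sum := by
  have hd : ∀ p : String × String,
      ((route.zip (PySem.List.slice route (some 1) none)).foldl
        (fun d p => d.insert p (d.getD p 0 + 1)) PySem.Dict.empty).getD p 0
      = ((route.zip route.tail).count p : Int) := by
    intro p
    rw [PySem.List.slice_from_one, PySem.Dict.getD_foldl_insert_add_one, PySem.Dict.getD_empty]
    simp
  have h : count_risky_holes_alt route connections
      = 0 + (connections.map (fun e =>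
        (e.2.map (fun q =>
          if pvRisky q.2 then ((route.zip route.tail).count (e.1, q.1) : Int) else 0)).sum)).sum :=
    pvB_outer (route.zip route.tail) _ hd connections 0
  rw [h, Int.zero_add]

-- swap, innermost: one route pair (ps, pt) against the adjacency list of one key s
theorem pvSwap_pair (s ps pt : String) (adj : List (String × (List (String × String)))) :
    (if ps = s then (adj.map (fun q => if q.1 == pt && pvRisky q.2 then (1 : Int) else 0)).sum else 0)
    = (adj.map (fun q => if pvRisky q.2 then (if (s, q.1) = (ps, pt) then (1 : Int) else 0) else 0)).sum := by
  by_cases hs : ps = s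
  · subst hs
    rw [if_pos rfl]
    apply congrArg
    apply List.map_congr_left
    intro q _
    by_cases h1 : q.1 = pt <;> by_cases h2 : pvRisky q.2 <;> simp [h1, h2]
  · rw [if_neg hs]
    symm
    apply List.sum_eq_zero
    intro x hx
    rcases List.mem_map.mp hx with ⟨q, hq, rfl⟩
    have hne : (s, q.1) ≠ (ps, pt) := by
      intro h
      exact hs (congrArg Prod.fst h).symm
    simp [hne]

-- swap: the sum over route pairs of one key's scan = the sum over that adjacency list of counts
theorem pvSwap (s : String) (adj : List (String × (List (String × String)))) (pairs : List (String × String)) :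
    (pairs.map (fun p => if p.1 = s then (adj.map (fun q => if q.1 == p.2 && pvRisky q.2 then (1 : Int) else 0)).sum else 0)).sum
    = (adj.map (fun q => if pvRisky q.2 then (pairs.count (s, q.1) : Int) else 0)).sum := by
  induction pairs with
  | nil =>
    symm
    apply List.sum_eq_zero
    intro x hx
    rcases List.mem_map.mp hx with ⟨q, hq, rfl⟩
    simp
  | cons p ps ih =>
    rw [List.map_cons, List.sum_cons, ih]
    have hsplit : (adj.map (fun q => if pvRisky q.2 then ((p :: ps).count (s, q.1) : Int) else 0))
        = adj.map (fun q =>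
            (if pvRisky q.2 then (if (s, q.1) = (p.1, p.2) then (1 : Int) else 0) else 0)
            + (if pvRisky q.2 then (ps.count (s, q.1) : Int) else 0)) := by
      apply List.map_congr_left
      intro q _
      by_cases h2 : pvRisky q.2
      · by_cases he : (s, q.1) = p
        · simp [h2, he]
          ring
        · have he' : ¬ p = (s, q.1) := fun hh => he hh.symm
          simp [h2, he, he']
      · simp [h2]
    rw [hsplit, PySem.List.sum_map_add_int, ← pvSwap_pair s p.1 p.2 adj]

-- Full exchange: with distinct keys, A's pair-sum equals B's adjacency sum.
theorem pvExchange (pairs : List (String × String)) (connections : List (String × List (String × (List (String × String)))))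
    (hnd : (connections.map Prod.fst).Nodup) :
    (pairs.map (pvG connections)).sum
    = (connections.map (fun e =>
        (e.2.map (fun q =>
          if pvRisky q.2 then (pairs.count (e.1, q.1) : Int) else 0)).sum)).sum := by
  induction connections with
  | nil =>
    apply List.sum_eq_zero
    intro x hx
    rcases List.mem_map.mp hx with ⟨p, hp, rfl⟩
    have h0 : (PySem.Dict.mk ([] : List (String × List (String × (List (String × String)))))).get? p.1 = none := by
      rw [PySem.Dict.get?_eq_none_iff_not_mem_keys]
      simp
    simp [pvG, h0]
  | cons e rest ih =>
    obtain ⟨k, adjl⟩ := e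
    simp only [List.map_cons, List.nodup_cons, List.mem_map] at hnd
    obtain ⟨hs, hnd'⟩ := hnd
    have hnone : (PySem.Dict.mk rest).get? k = none := by
      rw [PySem.Dict.get?_eq_none_iff_not_mem_keys]
      simp only [PySem.Dict.keys_mk]
      intro hmem
      rcases List.mem_map.mp hmem with ⟨y, hy, hye⟩
      exact hs ⟨y, hy, hye⟩
    have hG : ∀ p : String × String, pvG ((k, adjl) :: rest) p
        = (if p.1 = k then (adjl.map (fun q => if q.1 == p.2 && pvRisky q.2 then (1 : Int) else 0)).sum else 0)
          + pvG rest p := by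
      intro p
      by_cases h : p.1 = k
      · have h0 : pvG rest p = 0 := by
          simp [pvG, h, hnone]
        rw [h0, if_pos h, add_zero]
        simp [pvG, PySem.Dict.get?_mk_cons, h]
      · have hbe : (k == p.1) = false := by
          simp only [beq_eq_false_iff_ne]
          exact fun hh => h hh.symm
        rw [if_neg h, zero_add]
        simp [pvG, PySem.Dict.get?_mk_cons, hbe]
    have hmapG : (pairs.map (pvG ((k, adjl) :: rest)))
        = pairs.map (fun p =>
            (if p.1 = k then (adjl.map (fun q => if q.1 == p.2 && pvRisky q.2 then (1 : Int) else 0)).sum else 0)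
            + pvG rest p) := by
      apply List.map_congr_left
      intro p _
      exact hG p
    rw [hmapG, PySem.List.sum_map_add_int, ih hnd', pvSwap k adjl pairs]
    simp

-- ===== VERDICT (by name: the statement is the Claim_ definition above) =====
theorem count_risky_holes_spec : Claim_equal_count_risky_holes := by
  intro route connections _ hpre
  unfold Spec_count_risky_holes
  rw [pvA_eq_sum, pvB_eq_sum, pvExchange _ _ hpre.1]
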